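-- pv_equiv track=rewrite | github.com/TLparche/IMMS-AI | gateway/routers/websocket.py | trim_text_prefix_by_chars
-- ===== SOURCE A (Python) =====
-- def trim_text_prefix_by_chars(text: str, prefix_char_count: int) -> str:
--     if prefix_char_count <= 0:
--         return text.strip()
--     consumed = 0
--     cut_index = 0
--     for index, char in enumerate(text):
--         if char.isalnum():
--             consumed += 1
--         if consumed >= prefix_char_count:
--             cut_index = index + 1
--             break
--     return text[cut_index:].strip(" \n\t,.，。")
-- ===== SOURCE B (Python) =====
-- def trim_text_prefix_by_chars(text: str, prefix_char_count: int) -> str: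
--     if prefix_char_count <= 0:
--         return text.strip()
--     positions = [i for i, c in enumerate(text) if c.isalnum()]
--     if prefix_char_count <= len(positions):
--         cut_index = positions[prefix_char_count - 1] + 1
--     else:
--         cut_index = 0
--     return text[cut_index:].strip(" \n\t,.，。")
-- ===== Notes on version B (the rewrite author's own statement) =====
-- stated objective: alternative
-- what changed: Replaces A's counter-with-early-break scan by building the full table of alphanumeric indices once and cutting at the (n-1)-th entry by direct lookup (index 0 if there are fewer than n).
import Mathlib
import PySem

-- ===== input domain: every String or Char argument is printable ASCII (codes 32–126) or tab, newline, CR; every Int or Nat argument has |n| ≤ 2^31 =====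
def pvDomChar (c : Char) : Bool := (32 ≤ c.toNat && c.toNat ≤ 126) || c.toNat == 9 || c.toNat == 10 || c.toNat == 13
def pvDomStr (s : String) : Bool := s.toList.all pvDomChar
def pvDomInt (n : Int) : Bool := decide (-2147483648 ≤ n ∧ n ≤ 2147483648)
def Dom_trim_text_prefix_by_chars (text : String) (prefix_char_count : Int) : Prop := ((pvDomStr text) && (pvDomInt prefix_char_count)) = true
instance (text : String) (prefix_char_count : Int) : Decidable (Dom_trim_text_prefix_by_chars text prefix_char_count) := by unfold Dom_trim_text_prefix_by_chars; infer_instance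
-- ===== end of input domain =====

-- B replaces A's counter-with-early-break scan by a table of all alphanumeric
-- indices plus one arithmetic lookup (objective: alternative; same output).

-- ===== PORT A =====
-- the for-loop of A: carries (index, consumed); returns cut_index (0 if no break)
def trimLoopA (chars : List Char) (idx consumed n : Int) : Int :=
  match chars with
  | [] => 0
  | c :: rest =>
    let consumed' := if PySem.Chars.isalnum c then consumed + 1 else consumed
    if n ≤ consumed' then idx + 1 else trimLoopA rest (idx + 1) consumed' n

def trim_text_prefix_by_chars (text : String) (prefix_char_count : Int) : String :=
  if prefix_char_count ≤ 0 then PySem.Str.strip text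
  else
    let cut_index := trimLoopA text.toList 0 0 prefix_char_count
    PySem.Str.stripChars (PySem.Str.slice text (some cut_index) none) " \n\t,.，。"

-- ===== PORT B =====
def trim_text_prefix_by_chars_alt (text : String) (prefix_char_count : Int) : String :=
  if prefix_char_count ≤ 0 then PySem.Str.strip text
  else
    let positions := ((PySem.List.enumerate text.toList 0).filter
        (fun p => PySem.Chars.isalnum p.2)).map (·.1)
    let cut_index : Int :=
      if prefix_char_count ≤ (positions.length : Int) then
        positions.getD (prefix_char_count - 1).toNat 0 + 1
      else 0
    PySem.Str.stripChars (PySem.Str.slice text (some cut_index) none) " \n\t,.，。"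

-- ===== PRECONDITION & SPEC =====
def Spec_trim_text_prefix_by_chars (text : String) (prefix_char_count : Int) (out : String) : Prop := out = trim_text_prefix_by_chars_alt text prefix_char_count
instance (text : String) (prefix_char_count : Int) (out : String) : Decidable (Spec_trim_text_prefix_by_chars text prefix_char_count out) := by unfold Spec_trim_text_prefix_by_chars; infer_instance

-- ===== CLAIM (what is proved, stated in full; the proofs are below) =====
def Claim_equal_trim_text_prefix_by_chars : Prop := ∀ (text : String) (prefix_char_count : Int), Dom_trim_text_prefix_by_chars text prefix_char_count → Spec_trim_text_prefix_by_chars text prefix_char_count (trim_text_prefix_by_chars text prefix_char_count)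

-- ===== LEMMAS AND PROOFS =====

-- loop invariant: A's break-scan equals B's table lookup, for any start index
-- and any consumed count still below the target
theorem trimLoopA_eq (chars : List Char) (idx consumed n : Int)
    (h : consumed < n) :
    trimLoopA chars idx consumed n =
      (let ps := ((PySem.List.enumerate chars idx).filter
          (fun p => PySem.Chars.isalnum p.2)).map (·.1)
       if n ≤ consumed + (ps.length : Int) then
         ps.getD (n - consumed - 1).toNat 0 + 1
       else 0) := by
  induction chars generalizing idx consumed with
  | nil =>
    simp only [trimLoopA, PySem.List.enumerate_nil, List.filter_nil, List.map_nil,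
      List.length_nil]
    omega
  | cons c rest ih =>
    simp only [trimLoopA, PySem.List.enumerate_cons, List.filter_cons]
    by_cases ha : PySem.Chars.isalnum c
    · simp only [ha, if_pos, List.map_cons, List.length_cons]
      set ps' := ((PySem.List.enumerate rest (idx+1)).filter
        (fun p => PySem.Chars.isalnum p.2)).map (·.1) with hps'
      push_cast
      by_cases hb : n ≤ consumed + 1
      · rw [if_pos hb, if_pos (by omega)]
        have h0 : (n - consumed - 1).toNat = 0 := by omega
        simp [h0]
      · rw [if_neg hb, ih (idx + 1) (consumed + 1) (by omega)]
        simp only [← hps']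
        by_cases hc : n ≤ consumed + 1 + (ps'.length : Int)
        · rw [if_pos hc, if_pos (by omega)]
          have h1 : (n - consumed - 1).toNat = (n - (consumed + 1) - 1).toNat + 1 := by
            omega
          simp [h1]
        · rw [if_neg hc, if_neg (by omega)]
    · simp only [ha, Bool.false_eq_true, if_false]
      rw [if_neg (by omega), ih (idx + 1) consumed h]

theorem trim_text_prefix_by_chars_eq (text : String) (n : Int) :
    trim_text_prefix_by_chars text n = trim_text_prefix_by_chars_alt text n := by
  unfold trim_text_prefix_by_chars trim_text_prefix_by_chars_alt
  by_cases h : n ≤ 0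
  · simp [h]
  · rw [if_neg h, if_neg h]
    have := trimLoopA_eq text.toList 0 0 n (by omega)
    simp only [] at this
    rw [this]
    simp only [Int.zero_add, Int.sub_zero]

-- ===== VERDICT (by name: the statement is the Claim_ definition above) =====
theorem trim_text_prefix_by_chars_spec : Claim_equal_trim_text_prefix_by_chars := by
  intro text n _
  exact trim_text_prefix_by_chars_eq text n
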